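-- pv_equiv track=rewrite | github.com/yeseong31/coding-test | 프로그래머스/prev/PCCP/외톨이_알파벳.py | solution
-- ===== SOURCE A (Python) =====
-- from collections import defaultdict
--
-- def solution(input_string):
--     answer = set()
--     dic = defaultdict(int)
--     left = 0
--
--     for right in range(len(input_string) + 1):
--         if right == len(input_string):
--             dic[input_string[left]] += 1
--             break
--         if input_string[left] != input_string[right]:
--             dic[input_string[left]] += 1
--             left = right
--
--     for k in dic:
--         if dic[k] > 1 and k not in answer:
--             answer.add(k)
--
--     return ''.join(sorted(answer)) if answer else 'N'
-- ===== SOURCE B (Python) =====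
-- def solution(input_string):
--     first = {}
--     last = {}
--     cnt = {}
--     for i, ch in enumerate(input_string):
--         if ch not in first:
--             first[ch] = i
--         last[ch] = i
--         cnt[ch] = cnt.get(ch, 0) + 1
--     lonely = sorted(ch for ch in cnt if last[ch] - first[ch] + 1 != cnt[ch])
--     return ''.join(lonely) if lonely else 'N'
-- ===== Notes on version B (the rewrite author's own statement) =====
-- stated objective: alternative
-- what changed: A counts runs per character with a two-pointer run-boundary scan plus a defaultdict of run counts; B instead records first index, last index and occurrence count per character in one uniform pass and selects a character iff its occurrences are non-contiguous (last-first+1 != count), a closed-form test that never compares adjacent positions.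
import Mathlib
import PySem

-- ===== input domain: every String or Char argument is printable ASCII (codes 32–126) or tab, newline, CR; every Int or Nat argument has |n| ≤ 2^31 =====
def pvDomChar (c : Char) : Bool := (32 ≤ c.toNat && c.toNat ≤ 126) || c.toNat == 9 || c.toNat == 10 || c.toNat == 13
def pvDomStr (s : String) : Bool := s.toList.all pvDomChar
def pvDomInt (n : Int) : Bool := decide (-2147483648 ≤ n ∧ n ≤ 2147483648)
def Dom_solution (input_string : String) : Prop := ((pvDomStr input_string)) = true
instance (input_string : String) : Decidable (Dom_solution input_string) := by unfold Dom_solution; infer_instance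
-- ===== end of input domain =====

-- B replaces A's two-pointer run-boundary counting by a one-pass first/last/count record with a
-- contiguity test per character (alternative algorithm, same cost); equivalence proved for nonempty input.


-- ===== PORT A =====
-- the for-loop over range(len+1) with internal break; fuel = number of remaining range elements.
-- s.getD i ' ' models input_string[i]: every access is in range on Pre_ (nonempty string, indices < len).
def solutionLoop (s : List Char) (dic : PySem.Dict Char Int) (left : Nat) (right : Nat) : Nat → PySem.Dict Char Int
  | 0 => dic
  | fuel + 1 =>
    if right = s.length then
      dic.insert (s.getD left ' ') (dic.getD (s.getD left ' ') 0 + 1)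
    else if s.getD left ' ' ≠ s.getD right ' ' then
      solutionLoop s (dic.insert (s.getD left ' ') (dic.getD (s.getD left ' ') 0 + 1)) right (right + 1) fuel
    else
      solutionLoop s dic left (right + 1) fuel

-- for k in dic: if dic[k] > 1 and k not in answer: answer.add(k)
def solutionAnswer (dic : PySem.Dict Char Int) : PySem.Set Char :=
  dic.keys.foldl (fun ans k => if 1 < dic.getD k 0 ∧ k ∉ ans then PySem.Set.add ans k else ans) PySem.Set.empty

def solution (input_string : String) : String :=
  let s := input_string.toList
  let dic := solutionLoop s PySem.Dict.empty 0 0 (s.length + 1)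
  let answer := solutionAnswer dic
  if answer ≠ [] then String.ofList (PySem.List.sorted answer (fun x => x) false) else "N"

-- ===== PORT B =====
-- one enumerate pass maintaining (first, last, cnt); dict lookups first[ch]/last[ch] are on keys
-- present in the dict, so getD with default 0 is exact.
def solutionStep (t : PySem.Dict Char Int × PySem.Dict Char Int × PySem.Dict Char Int)
    (p : Int × Char) : PySem.Dict Char Int × PySem.Dict Char Int × PySem.Dict Char Int :=
  (if t.1.contains p.2 then t.1 else t.1.insert p.2 p.1,
   t.2.1.insert p.2 p.1,
   t.2.2.insert p.2 (t.2.2.getD p.2 0 + 1))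

def solution_alt (input_string : String) : String :=
  let s := input_string.toList
  let st := (PySem.List.enumerate s 0).foldl solutionStep (PySem.Dict.empty, PySem.Dict.empty, PySem.Dict.empty)
  let lonely := PySem.List.sorted
    ((st.2.2.keys).filter (fun ch => decide ((st.2.1).getD ch 0 - (st.1).getD ch 0 + 1 ≠ (st.2.2).getD ch 0)))
    (fun x => x) false
  if lonely ≠ [] then String.ofList lonely else "N"

-- ===== PRECONDITION & SPEC =====
-- Pre_ excludes exactly the empty string, on which A raises IndexError.
def Pre_solution (input_string : String) : Prop := input_string ≠ ""
instance (input_string : String) : Decidable (Pre_solution input_string) := by unfold Pre_solution; infer_instance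
def pvWitness_solution : String := "aabxa"

def Spec_solution (input_string : String) (out : String) : Prop := out = solution_alt input_string
instance (input_string : String) (out : String) : Decidable (Spec_solution input_string out) := by unfold Spec_solution; infer_instance

-- ===== CLAIM (what is proved, stated in full; the proofs are below) =====
def Claim_equal_solution : Prop := ∀ (input_string : String), Dom_solution input_string → Pre_solution input_string → Spec_solution input_string (solution input_string)

-- ===== LEMMAS AND PROOFS =====

-- number of (maximal) runs of the character c in l, counted at each run's last position
def runEnds (c : Char) : List Char → Nat
  | [] => 0
  | x :: xs => (if x = c ∧ xs.head? ≠ some c then 1 else 0) + runEnds c xs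
def lIdx (c : Char) : List Char → Nat
  | [] => 0
  | x :: xs => if c ∈ xs then lIdx c xs + 1 else (if x = c then 0 else 0)

lemma runEnds_eq_zero (c : Char) (l : List Char) (h : c ∉ l) : runEnds c l = 0 := by
  induction l with
  | nil => rfl
  | cons x xs ih =>
    simp only [List.mem_cons, not_or] at h
    simp [runEnds, ih h.2, Ne.symm h.1]

lemma runEnds_pos (c : Char) (l : List Char) (h : c ∈ l) : 1 ≤ runEnds c l := by
  induction l with
  | nil => simp at h
  | cons x xs ih =>
    rcases List.mem_cons.1 h with h1 | h2
    · subst h1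
      by_cases hm : c ∈ xs
      · have := ih hm; simp [runEnds]; omega
      · have h0 : xs.head? ≠ some c := by
          cases xs with
          | nil => simp
          | cons y ys => simp; rintro rfl; exact hm (by simp)
        simp [runEnds, h0]
    · have := ih h2; simp [runEnds]; omega



lemma lIdx_cons_of_mem (c x : Char) (xs : List Char) (hm : c ∈ xs) :
    lIdx c (x :: xs) = lIdx c xs + 1 := by simp [lIdx, hm]

lemma idx_bounds (c : Char) (l : List Char) (h : c ∈ l) :
    l.idxOf c ≤ lIdx c l ∧ l.count c + l.idxOf c ≤ lIdx c l + 1 := by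
  induction l with
  | nil => simp at h
  | cons x xs ih =>
    by_cases hm : c ∈ xs
    · have IH := ih hm
      rw [lIdx_cons_of_mem c x xs hm]
      by_cases hx : x = c
      · rcases hx.symm with rfl
        rw [List.count_cons_self, List.idxOf_cons_self]
        omega
      · rw [List.count_cons_of_ne hx, List.idxOf_cons_ne _ hx]
        omega
    · have hx : x = c := by rcases List.mem_cons.1 h with h1 | h2; exact h1.symm; exact absurd h2 hm
      rcases hx.symm with rfl
      rw [List.count_cons_self, List.idxOf_cons_self, List.count_eq_zero_of_not_mem hm]
      simp [lIdx, hm]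

lemma runEnds_one_iff (c : Char) (l : List Char) (h : c ∈ l) :
    (runEnds c l = 1 ↔ lIdx c l + 1 = l.idxOf c + l.count c) := by
  induction l with
  | nil => simp at h
  | cons x xs ih =>
    by_cases hm : c ∈ xs
    · have IH := ih hm
      have hb := idx_bounds c xs hm
      have hpos := runEnds_pos c xs hm
      rw [lIdx_cons_of_mem c x xs hm]
      by_cases hx : x = c
      · rcases hx.symm with rfl
        rw [List.count_cons_self, List.idxOf_cons_self]
        cases xs with
        | nil => simp at hm
        | cons y ys =>
          by_cases hy : c = y
          · rcases hy with rfl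
            have hre : runEnds c (c :: c :: ys) = runEnds c (c :: ys) := by
              simp [runEnds]
            rw [List.idxOf_cons_self] at IH hb
            rw [hre]
            omega
          · have hre : runEnds c (c :: y :: ys) = 1 + runEnds c (y :: ys) := by
              simp [runEnds, Ne.symm hy]
            rw [List.idxOf_cons_ne _ (Ne.symm hy)] at IH hb
            rw [hre]
            omega
      · have hre : runEnds c (x :: xs) = runEnds c xs := by
          simp [runEnds, hx]
        rw [hre, List.count_cons_of_ne hx, List.idxOf_cons_ne _ hx]
        omega
    · have hx : x = c := by rcases List.mem_cons.1 h with h1 | h2; exact h1.symm; exact absurd h2 hm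
      rcases hx.symm with rfl
      have h0 : xs.head? ≠ some c := by
        cases xs with
        | nil => simp
        | cons y ys => simp; rintro rfl; exact hm (by simp)
      rw [List.count_cons_self, List.idxOf_cons_self, List.count_eq_zero_of_not_mem hm]
      simp [runEnds, h0, runEnds_eq_zero c xs hm, lIdx, hm]

-- semantics of A's loop, abstracted to (current run char, remaining suffix)
def goA (a : Char) : List Char → PySem.Dict Char Int → PySem.Dict Char Int
  | [], dic => dic.insert a (dic.getD a 0 + 1)
  | x :: t, dic =>
    if a ≠ x then goA x t (dic.insert a (dic.getD a 0 + 1)) else goA a t dic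
lemma loop_eq_goA : ∀ (fuel : Nat) (s : List Char) (dic : PySem.Dict Char Int) (left right : Nat),
    right ≤ s.length → left < s.length → s.length + 1 - right ≤ fuel →
    solutionLoop s dic left right fuel = goA (s.getD left ' ') (s.drop right) dic := by
  intro fuel
  induction fuel with
  | zero => intro s dic left right h1 h2 h3; omega
  | succ fuel ih =>
    intro s dic left right h1 h2 h3
    by_cases he : right = s.length
    · subst he
      rw [solutionLoop, if_pos rfl, List.drop_length, goA]
    · have hr : right < s.length := by omega
      have hgr : s.getD right ' ' = s[right] := List.getD_eq_getElem s ' ' hr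
      by_cases hne : s.getD left ' ' ≠ s.getD right ' '
      · rw [solutionLoop, if_neg he, if_pos hne,
            ih s _ right (right + 1) (by omega) hr (by omega),
            List.drop_eq_getElem_cons hr, goA, if_pos (by rw [← hgr]; exact hne), hgr]
      · rw [solutionLoop, if_neg he, if_neg hne,
            ih s dic left (right + 1) (by omega) h2 (by omega),
            List.drop_eq_getElem_cons hr, goA, if_neg (by rw [← hgr]; exact hne)]

lemma getD_goA : ∀ (r : List Char) (a : Char) (dic : PySem.Dict Char Int) (c : Char),
    (goA a r dic).getD c 0 = dic.getD c 0 + (runEnds c (a :: r) : Nat) := by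
  intro r
  induction r with
  | nil =>
    intro a dic c
    by_cases h : c = a
    · subst h
      simp [goA, runEnds, PySem.Dict.getD_insert_self]
    · rw [goA, PySem.Dict.getD_insert_of_ne _ _ _ h]
      simp [runEnds, Ne.symm h]
  | cons x t ih =>
    intro a dic c
    by_cases hax : a = x
    · rcases hax with rfl
      have hg : goA a (a :: t) dic = goA a t dic := by simp [goA]
      rw [hg, ih a dic c]
      have hre : runEnds c (a :: a :: t) = runEnds c (a :: t) := by
        by_cases hca : a = c <;> simp [runEnds, hca]
      rw [hre]
    · have hg : goA a (x :: t) dic = goA x t (dic.insert a (dic.getD a 0 + 1)) := by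
        simp [goA, hax]
      rw [hg, ih x _ c]
      by_cases hca : c = a
      · rcases hca with rfl
        rw [PySem.Dict.getD_insert_self]
        have hre : runEnds c (c :: x :: t) = 1 + runEnds c (x :: t) := by
          simp [runEnds, Ne.symm hax]
        rw [hre]
        push_cast
        ring
      · rw [PySem.Dict.getD_insert_of_ne _ _ _ hca]
        have hre : runEnds c (a :: x :: t) = runEnds c (x :: t) := by
          have hac : ¬ (a = c) := fun h => hca h.symm
          simp [runEnds, hac]
        rw [hre]

lemma mem_keys_goA : ∀ (r : List Char) (a : Char) (dic : PySem.Dict Char Int) (c : Char),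
    (c ∈ (goA a r dic).keys ↔ c ∈ dic.keys ∨ c = a ∨ c ∈ r) := by
  intro r
  induction r with
  | nil =>
    intro a dic c
    rw [goA, PySem.Dict.mem_keys_insert]
    simp
    tauto
  | cons x t ih =>
    intro a dic c
    by_cases hax : a = x
    · rcases hax with rfl
      have hg : goA a (a :: t) dic = goA a t dic := by simp [goA]
      rw [hg, ih]
      simp only [List.mem_cons]
      tauto
    · have hg : goA a (x :: t) dic = goA x t (dic.insert a (dic.getD a 0 + 1)) := by
        simp [goA, hax]
      rw [hg, ih]
      rw [PySem.Dict.mem_keys_insert]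
      simp
      tauto

lemma mem_answer_fold : ∀ (ks : List Char) (dic : PySem.Dict Char Int) (ans0 : List Char) (c : Char),
    (c ∈ ks.foldl (fun ans k => if 1 < dic.getD k 0 ∧ k ∉ ans then PySem.Set.add ans k else ans) ans0 ↔
      c ∈ ans0 ∨ (c ∈ ks ∧ 1 < dic.getD c 0)) := by
  intro ks
  induction ks with
  | nil => simp
  | cons k ks ih =>
    intro dic ans0 c
    rw [List.foldl_cons, ih]
    simp only [List.mem_cons]
    by_cases h1 : 1 < dic.getD k 0
    · by_cases h2 : k ∈ ans0
      · rw [if_neg (by tauto)]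
        constructor
        · rintro (h | h)
          · exact Or.inl h
          · exact Or.inr ⟨Or.inr h.1, h.2⟩
        · rintro (h | ⟨(rfl | h), hp⟩)
          · exact Or.inl h
          · exact Or.inl h2
          · exact Or.inr ⟨h, hp⟩
      · rw [if_pos ⟨h1, h2⟩]
        constructor
        · rintro (h | h)
          · rcases (PySem.Set.mem_add ans0 k c).1 h with h3 | h3
            · exact Or.inl h3
            · exact Or.inr ⟨Or.inl h3, h3 ▸ h1⟩
          · exact Or.inr ⟨Or.inr h.1, h.2⟩
        · rintro (h | ⟨(rfl | h), hp⟩)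
          · exact Or.inl ((PySem.Set.mem_add ans0 k c).2 (Or.inl h))
          · exact Or.inl ((PySem.Set.mem_add ans0 c c).2 (Or.inr rfl))
          · exact Or.inr ⟨h, hp⟩
    · rw [if_neg (by tauto)]
      constructor
      · rintro (h | h)
        · exact Or.inl h
        · exact Or.inr ⟨Or.inr h.1, h.2⟩
      · rintro (h | ⟨(rfl | h), hp⟩)
        · exact Or.inl h
        · exact absurd hp h1
        · exact Or.inr ⟨h, hp⟩

lemma nodup_answer_fold : ∀ (ks : List Char) (dic : PySem.Dict Char Int) (ans0 : List Char),
    ans0.Nodup →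
    (ks.foldl (fun ans k => if 1 < dic.getD k 0 ∧ k ∉ ans then PySem.Set.add ans k else ans) ans0).Nodup := by
  intro ks
  induction ks with
  | nil => intro _ _ h; simpa using h
  | cons k ks ih =>
    intro dic ans0 h
    rw [List.foldl_cons]
    by_cases h1 : 1 < dic.getD k 0 ∧ k ∉ ans0
    · rw [if_pos h1]
      exact ih dic _ (PySem.Set.nodup_add _ _ h)
    · rw [if_neg h1]
      exact ih dic _ h
lemma cnt_fold (c : Char) : ∀ (s : List Char) (i : Int)
    (st : PySem.Dict Char Int × PySem.Dict Char Int × PySem.Dict Char Int),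
    (((PySem.List.enumerate s i).foldl solutionStep st).2.2).getD c 0 = (st.2.2).getD c 0 + (s.count c : Nat) := by
  intro s
  induction s with
  | nil => intro i st; simp [PySem.List.enumerate_nil]
  | cons x xs ih =>
    intro i st
    rw [PySem.List.enumerate_cons, List.foldl_cons, ih]
    by_cases hcx : c = x
    · rcases hcx with rfl
      have : (solutionStep st (i, c)).2.2.getD c 0 = st.2.2.getD c 0 + 1 := by
        simp [solutionStep, PySem.Dict.getD_insert_self]
      rw [this, List.count_cons_self]
      push_cast; ring
    · have : (solutionStep st (i, x)).2.2.getD c 0 = st.2.2.getD c 0 := by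
        simp only [solutionStep]
        exact PySem.Dict.getD_insert_of_ne _ _ _ hcx
      rw [this, List.count_cons_of_ne (fun h => hcx h.symm)]
  
lemma mem_keys_cnt_fold (c : Char) : ∀ (s : List Char) (i : Int)
    (st : PySem.Dict Char Int × PySem.Dict Char Int × PySem.Dict Char Int),
    (c ∈ (((PySem.List.enumerate s i).foldl solutionStep st).2.2).keys ↔ c ∈ (st.2.2).keys ∨ c ∈ s) := by
  intro s
  induction s with
  | nil => intro i st; simp [PySem.List.enumerate_nil]
  | cons x xs ih =>
    intro i st
    rw [PySem.List.enumerate_cons, List.foldl_cons, ih]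
    have : (solutionStep st (i, x)).2.2 = st.2.2.insert x (st.2.2.getD x 0 + 1) := rfl
    rw [this, PySem.Dict.mem_keys_insert]
    simp only [List.mem_cons]
    tauto

lemma nodup_keys_cnt_fold : ∀ (s : List Char) (i : Int)
    (st : PySem.Dict Char Int × PySem.Dict Char Int × PySem.Dict Char Int),
    (st.2.2).keys.Nodup → (((PySem.List.enumerate s i).foldl solutionStep st).2.2).keys.Nodup := by
  intro s
  induction s with
  | nil => intro i st h; simpa [PySem.List.enumerate_nil] using h
  | cons x xs ih =>
    intro i st h
    rw [PySem.List.enumerate_cons, List.foldl_cons]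
    exact ih (i + 1) _ (PySem.Dict.nodup_keys_insert _ _ _ h)

lemma first_fold (c : Char) : ∀ (s : List Char) (i : Int)
    (st : PySem.Dict Char Int × PySem.Dict Char Int × PySem.Dict Char Int),
    (c ∈ (st.1).keys → (((PySem.List.enumerate s i).foldl solutionStep st).1).getD c 0 = (st.1).getD c 0) ∧
    (c ∉ (st.1).keys → c ∈ s → (((PySem.List.enumerate s i).foldl solutionStep st).1).getD c 0 = i + (s.idxOf c : Nat)) := by
  intro s
  induction s with
  | nil =>
    intro i st
    exact ⟨fun _ => by simp [PySem.List.enumerate_nil], fun _ h => absurd h (List.not_mem_nil)⟩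
  | cons x xs ih =>
    intro i st
    rw [PySem.List.enumerate_cons, List.foldl_cons]
    constructor
    · intro hc
      by_cases hxk : st.1.contains x
      · have hF : (solutionStep st (i, x)).1 = st.1 := by simp [solutionStep, hxk]
        rw [(ih (i + 1) _).1 (by rw [hF]; exact hc), hF]
      · have hF : (solutionStep st (i, x)).1 = st.1.insert x i := by simp [solutionStep, hxk]
        have hcx : c ≠ x := by
          rintro rfl
          exact absurd ((PySem.Dict.contains_iff_mem_keys _ _).2 hc) (by simpa using hxk)
        have h1 : c ∈ (solutionStep st (i, x)).1.keys := by
          rw [hF, PySem.Dict.mem_keys_insert]; exact Or.inr hc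
        rw [(ih (i + 1) _).1 h1, hF, PySem.Dict.getD_insert_of_ne _ _ _ hcx]
    · intro hc hmem
      by_cases hcx : c = x
      · rcases hcx with rfl
        have hxk : st.1.contains c = false := by
          rw [← Bool.not_eq_true]
          intro hh
          exact hc ((PySem.Dict.contains_iff_mem_keys _ _).1 hh)
        have hF : (solutionStep st (i, c)).1 = st.1.insert c i := by simp [solutionStep, hxk]
        have h1 : c ∈ (solutionStep st (i, c)).1.keys := by
          rw [hF, PySem.Dict.mem_keys_insert]; exact Or.inl rfl
        rw [(ih (i + 1) _).1 h1, hF, PySem.Dict.getD_insert_self, List.idxOf_cons_self]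
        simp
      · have hmem' : c ∈ xs := by
          rcases List.mem_cons.1 hmem with h | h
          · exact absurd h hcx
          · exact h
        have h1 : c ∉ (solutionStep st (i, x)).1.keys := by
          simp only [solutionStep]
          by_cases hxk : st.1.contains x <;> simp [hxk, PySem.Dict.mem_keys_insert, hcx, hc]
        rw [(ih (i + 1) _).2 h1 hmem', List.idxOf_cons_ne _ (fun h => hcx h.symm)]
        push_cast; ring

lemma last_fold (c : Char) : ∀ (s : List Char) (i : Int)
    (st : PySem.Dict Char Int × PySem.Dict Char Int × PySem.Dict Char Int),
    (c ∉ s → (((PySem.List.enumerate s i).foldl solutionStep st).2.1).getD c 0 = (st.2.1).getD c 0) ∧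
    (c ∈ s → (((PySem.List.enumerate s i).foldl solutionStep st).2.1).getD c 0 = i + (lIdx c s : Nat)) := by
  intro s
  induction s with
  | nil =>
    intro i st
    exact ⟨fun _ => by simp [PySem.List.enumerate_nil], fun h => absurd h (List.not_mem_nil)⟩
  | cons x xs ih =>
    intro i st
    rw [PySem.List.enumerate_cons, List.foldl_cons]
    have hL : (solutionStep st (i, x)).2.1 = st.2.1.insert x i := rfl
    constructor
    · intro hc
      simp only [List.mem_cons, not_or] at hc
      rw [(ih (i + 1) _).1 hc.2, hL, PySem.Dict.getD_insert_of_ne _ _ _ hc.1]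
    · intro hc
      by_cases hm : c ∈ xs
      · rw [(ih (i + 1) _).2 hm, lIdx_cons_of_mem c x xs hm]
        push_cast; ring
      · have hcx : x = c := by
          rcases List.mem_cons.1 hc with h | h
          · exact h.symm
          · exact absurd h hm
        rcases hcx.symm with rfl
        rw [(ih (i + 1) _).1 hm, hL, PySem.Dict.getD_insert_self]
        simp [lIdx, hm]

lemma final_glue (LA LB : List Char) (hperm : LA.Perm LB) :
    (if LA ≠ [] then String.ofList (PySem.List.sorted LA (fun x => x) false) else "N")
      = (if PySem.List.sorted LB (fun x => x) false ≠ [] then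
          String.ofList (PySem.List.sorted LB (fun x => x) false) else "N") := by
  have hsorted := PySem.List.sorted_eq_sorted_of_perm LA LB (fun x : Char => x)
    (fun a b h => h) hperm
  by_cases h : LA = []
  · rw [if_neg (fun hh => hh h), if_neg (by
      rw [← hsorted]
      simp [PySem.List.sorted_eq_nil_iff, h])]
  · rw [if_pos h, if_pos (by
      rw [← hsorted]
      simpa [PySem.List.sorted_eq_nil_iff] using h), hsorted]

-- ===== VERDICT (by name: the statement is the Claim_ definition above) =====
theorem solution_spec : Claim_equal_solution := by
  intro s _ hpre
  unfold Spec_solution solution solution_alt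
  have hl : s.toList ≠ [] := fun h => hpre (String.toList_eq_nil_iff.mp h)
  cases hxl : s.toList with
  | nil => exact absurd hxl hl
  | cons x xs =>
    simp only []
    -- A's dict is goA x xs empty
    have hloop : solutionLoop (x :: xs) PySem.Dict.empty 0 0 ((x :: xs).length + 1)
        = goA x xs PySem.Dict.empty := by
      rw [loop_eq_goA ((x :: xs).length + 1) (x :: xs) PySem.Dict.empty 0 0
            (by omega) (by simp) (by omega)]
      simp [goA]
    rw [hloop]
    -- per-character description of A's answer set
    have hmemA : ∀ c, c ∈ solutionAnswer (goA x xs PySem.Dict.empty) ↔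
        (c ∈ x :: xs ∧ 1 < runEnds c (x :: xs)) := by
      intro c
      unfold solutionAnswer
      rw [mem_answer_fold]
      rw [getD_goA, PySem.Dict.getD_empty]
      constructor
      · rintro (h | ⟨h1, h2⟩)
        · simp [PySem.Set.empty] at h
        · refine ⟨(mem_keys_goA xs x PySem.Dict.empty c).1 h1 |>.elim
            (fun h => by rw [PySem.Dict.keys_empty] at h; simp at h)
            (fun h => List.mem_cons.2 h), ?_⟩
          omega
      · rintro ⟨h1, h2⟩
        refine Or.inr ⟨(mem_keys_goA xs x PySem.Dict.empty c).2 (Or.inr (List.mem_cons.1 h1)), ?_⟩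
        omega
    have hnodupA : (solutionAnswer (goA x xs PySem.Dict.empty)).Nodup := by
      unfold solutionAnswer
      exact nodup_answer_fold _ _ _ (by simp [PySem.Set.empty])
    -- per-character description of B's lonely list (before sorting)
    have hmemB : ∀ c, c ∈ (((PySem.List.enumerate (x :: xs) 0).foldl solutionStep
          (PySem.Dict.empty, PySem.Dict.empty, PySem.Dict.empty)).2.2.keys.filter
          (fun ch => decide ((((PySem.List.enumerate (x :: xs) 0).foldl solutionStep
            (PySem.Dict.empty, PySem.Dict.empty, PySem.Dict.empty)).2.1.getD ch 0 -
            ((PySem.List.enumerate (x :: xs) 0).foldl solutionStep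
            (PySem.Dict.empty, PySem.Dict.empty, PySem.Dict.empty)).1.getD ch 0 + 1 ≠
            ((PySem.List.enumerate (x :: xs) 0).foldl solutionStep
            (PySem.Dict.empty, PySem.Dict.empty, PySem.Dict.empty)).2.2.getD ch 0)))) ↔
        (c ∈ x :: xs ∧ 1 < runEnds c (x :: xs)) := by
      intro c
      rw [List.mem_filter, decide_eq_true_iff]
      rw [mem_keys_cnt_fold, PySem.Dict.keys_empty]
      constructor
      · rintro ⟨h1 | h1, h2⟩
        · simp at h1
        · refine ⟨h1, ?_⟩
          rw [cnt_fold, (first_fold c (x :: xs) 0 _).2 (by rw [PySem.Dict.keys_empty]; simp) h1,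
              (last_fold c (x :: xs) 0 _).2 h1, PySem.Dict.getD_empty] at h2
          have hb := idx_bounds c (x :: xs) h1
          have hp := runEnds_pos c (x :: xs) h1
          have hiff := runEnds_one_iff c (x :: xs) h1
          by_contra hc
          have h3 : runEnds c (x :: xs) = 1 := by omega
          rw [hiff] at h3
          apply h2
          omega
      · rintro ⟨h1, h2⟩
        refine ⟨Or.inr h1, ?_⟩
        rw [cnt_fold, (first_fold c (x :: xs) 0 _).2 (by rw [PySem.Dict.keys_empty]; simp) h1,
            (last_fold c (x :: xs) 0 _).2 h1, PySem.Dict.getD_empty]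
        have hb := idx_bounds c (x :: xs) h1
        have hiff := runEnds_one_iff c (x :: xs) h1
        have h3 : ¬ (runEnds c (x :: xs) = 1) := by omega
        rw [hiff] at h3
        intro hc
        apply h3
        omega
    have hnodupB := List.Nodup.filter
      (fun ch => decide ((((PySem.List.enumerate (x :: xs) 0).foldl solutionStep
            (PySem.Dict.empty, PySem.Dict.empty, PySem.Dict.empty)).2.1.getD ch 0 -
            ((PySem.List.enumerate (x :: xs) 0).foldl solutionStep
            (PySem.Dict.empty, PySem.Dict.empty, PySem.Dict.empty)).1.getD ch 0 + 1 ≠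
            ((PySem.List.enumerate (x :: xs) 0).foldl solutionStep
            (PySem.Dict.empty, PySem.Dict.empty, PySem.Dict.empty)).2.2.getD ch 0)))
      (nodup_keys_cnt_fold (x :: xs) 0 (PySem.Dict.empty, PySem.Dict.empty, PySem.Dict.empty)
        (by rw [PySem.Dict.keys_empty]; exact List.nodup_nil))
    have hperm := (List.perm_ext_iff_of_nodup hnodupA hnodupB).2
      (fun c => (hmemA c).trans (hmemB c).symm)
    exact final_glue _ _ hperm
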